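-- pv_equiv track=rewrite | github.com/pypi-data/pypi-mirror-82 | packages/snw/snw-2.7.6.tar.gz/snw-2.7.6/client/lib/utils.py | _get_params_except_specified
-- ===== SOURCE A (Python) =====
-- def _get_params_except_specified(lparam, listcmd):
--     res = []
--     idx = 0
--     while idx < len(listcmd):
--         if listcmd[idx] in lparam:
--             idx = idx + 1
--             while idx < len(listcmd) and not listcmd[idx].startswith('-'):
--                 idx += 1
--         else:
--             res.append(listcmd[idx])
--             idx = idx + 1
--             while idx < len(listcmd) and not listcmd[idx].startswith('-'):
--                 res.append(listcmd[idx])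
--                 idx += 1
--     return res
-- ===== SOURCE B (Python) =====
-- def _get_params_except_specified(lparam, listcmd):
--     # two phases: group tokens into option runs, then keep the runs whose head is not excluded
--     groups = []
--     for tok in listcmd:
--         if not groups or tok.startswith('-'):
--             groups.append([tok])
--         else:
--             groups[-1].append(tok)
--     res = []
--     for g in groups:
--         if g[0] not in lparam:
--             res.extend(g)
--     return res
-- ===== Notes on version B (the rewrite author's own statement) =====
-- stated objective: simpler
-- what changed: Replaced A's index-driven while loop with nested run-consuming inner loops by a two-phase decomposition: one pass grouping tokens into option runs (new run at the start or at a '-'-token), then one pass keeping the runs whose head is not in lparam.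
import Mathlib
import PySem

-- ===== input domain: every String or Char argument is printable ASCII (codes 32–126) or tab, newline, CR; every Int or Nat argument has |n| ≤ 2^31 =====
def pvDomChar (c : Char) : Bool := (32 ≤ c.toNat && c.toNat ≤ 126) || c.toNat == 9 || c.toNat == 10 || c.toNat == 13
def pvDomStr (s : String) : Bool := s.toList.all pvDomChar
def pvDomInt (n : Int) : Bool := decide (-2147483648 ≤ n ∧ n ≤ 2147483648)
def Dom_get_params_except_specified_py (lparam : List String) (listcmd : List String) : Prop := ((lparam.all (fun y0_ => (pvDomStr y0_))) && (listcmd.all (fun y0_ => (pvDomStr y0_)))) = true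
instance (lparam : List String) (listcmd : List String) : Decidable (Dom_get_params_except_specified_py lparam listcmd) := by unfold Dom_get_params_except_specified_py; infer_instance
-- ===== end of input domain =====

-- B replaces A's index-driven while loop (with nested run-skipping inner loops) by a
-- two-phase decomposition: group tokens into runs, then keep runs whose head is not excluded.


-- ===== PORT A =====
-- inner while loop of the 'in lparam' branch: advance idx past non-'-' tokens
-- (the while loops over an index into listcmd; ported as recursion on the remaining suffix)
def pvSkipRun : List String → List String
  | [] => []
  | t :: rest => if ¬ (PySem.Str.startswith t "-") then pvSkipRun rest else t :: rest

-- inner while loop of the else branch: collect the run and return the remaining suffix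
def pvTakeRun : List String → List String × List String
  | [] => ([], [])
  | t :: rest =>
    if ¬ (PySem.Str.startswith t "-") then
      let p := pvTakeRun rest
      (t :: p.1, p.2)
    else ([], t :: rest)

theorem pvSkipRun_length_le : ∀ (l : List String), (pvSkipRun l).length ≤ l.length := by
  intro l
  induction l with
  | nil => simp [pvSkipRun]
  | cons t rest ih =>
    simp only [pvSkipRun]
    split
    · exact Nat.le_succ_of_le ih
    · simp

theorem pvTakeRun_length_le : ∀ (l : List String), (pvTakeRun l).2.length ≤ l.length := by
  intro l
  induction l with
  | nil => simp [pvTakeRun]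
  | cons t rest ih =>
    simp only [pvTakeRun]
    split
    · exact Nat.le_succ_of_le ih
    · simp

-- the outer while loop of A
def pvALoop (lparam : List String) : List String → List String
  | [] => []
  | t :: rest =>
    if lparam.contains t then
      pvALoop lparam (pvSkipRun rest)
    else
      t :: (pvTakeRun rest).1 ++ pvALoop lparam (pvTakeRun rest).2
  termination_by l => l.length
  decreasing_by
  · exact Nat.lt_succ_of_le (pvSkipRun_length_le rest)
  · exact Nat.lt_succ_of_le (pvTakeRun_length_le rest)

def get_params_except_specified_py (lparam : List String) (listcmd : List String) : List String :=
  pvALoop lparam listcmd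

-- ===== PORT B =====
-- phase 1 step: start a new run at the start or at a '-'-token, else append to the last run
def pvGroupStep (gs : List (List String)) (tok : String) : List (List String) :=
  if gs.isEmpty || PySem.Str.startswith tok "-" then gs ++ [[tok]]
  else gs.dropLast ++ [(gs.getLastD []) ++ [tok]]

def get_params_except_specified_py_alt (lparam : List String) (listcmd : List String) : List String :=
  let groups := listcmd.foldl pvGroupStep []
  groups.foldl (fun res g => if ¬ (lparam.contains (g.headD "")) then res ++ g else res) []

-- ===== PRECONDITION & SPEC =====
def Spec_get_params_except_specified_py (lparam : List String) (listcmd : List String) (out : List String) : Prop := out = get_params_except_specified_py_alt lparam listcmd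
instance (lparam : List String) (listcmd : List String) (out : List String) : Decidable (Spec_get_params_except_specified_py lparam listcmd out) := by unfold Spec_get_params_except_specified_py; infer_instance

-- ===== CLAIM (what is proved, stated in full; the proofs are below) =====
def Claim_equal_get_params_except_specified_py : Prop := ∀ (lparam : List String) (listcmd : List String), Dom_get_params_except_specified_py lparam listcmd → Spec_get_params_except_specified_py lparam listcmd (get_params_except_specified_py lparam listcmd)

-- ===== LEMMAS AND PROOFS =====

-- canonical grouping of a token list into runs
def pvGrp : List String → List (List String)
  | [] => []
  | t :: rest => (t :: (pvTakeRun rest).1) :: pvGrp (pvTakeRun rest).2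
  termination_by l => l.length
  decreasing_by
  · exact Nat.lt_succ_of_le (pvTakeRun_length_le rest)

theorem pvSkipRun_eq_takeRun_snd : ∀ (l : List String), pvSkipRun l = (pvTakeRun l).2 := by
  intro l
  induction l with
  | nil => simp [pvSkipRun, pvTakeRun]
  | cons t rest ih =>
    simp only [pvSkipRun, pvTakeRun]
    split
    · exact ih
    · simp

theorem pvTakeRun_pos (t : String) (rest : List String) (h : PySem.Str.startswith t "-" = true) :
    pvTakeRun (t :: rest) = ([], t :: rest) := by
  simp only [pvTakeRun]
  rw [if_neg (not_not_intro h)]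

theorem pvTakeRun_neg (t : String) (rest : List String) (h : ¬ PySem.Str.startswith t "-" = true) :
    pvTakeRun (t :: rest) = (t :: (pvTakeRun rest).1, (pvTakeRun rest).2) := by
  simp only [pvTakeRun]
  rw [if_pos h]

theorem pvGrp_cons (t : String) (rest : List String) :
    pvGrp (t :: rest) = (t :: (pvTakeRun rest).1) :: pvGrp (pvTakeRun rest).2 := by
  rw [pvGrp]

theorem pvLastSplit : ∀ (gs : List (List String)), gs ≠ [] → gs.dropLast ++ [gs.getLastD []] = gs := by
  intro gs
  induction gs with
  | nil => intro h; exact absurd rfl h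
  | cons a as ih =>
    intro _
    cases as with
    | nil => rfl
    | cons b bs =>
      have h2 := ih (by simp)
      show a :: ((b :: bs).dropLast ++ [(b :: bs).getLastD []]) = a :: (b :: bs)
      rw [h2]

-- phase 1 of B builds exactly the canonical grouping (generalized over a nonempty accumulator)
theorem pvFoldGroup (l : List String) : ∀ (gs : List (List String)), gs ≠ [] →
    l.foldl pvGroupStep gs =
      gs.dropLast ++ ((gs.getLastD [] ++ (pvTakeRun l).1) :: pvGrp (pvTakeRun l).2) := by
  induction l with
  | nil =>
    intro gs hgs
    rw [List.foldl_nil, show pvTakeRun ([] : List String) = ([], []) from rfl,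
        show pvGrp [] = [] from by rw [pvGrp], List.append_nil]
    exact (pvLastSplit gs hgs).symm
  | cons t rest ih =>
    intro gs hgs
    rw [List.foldl_cons]
    by_cases hd : PySem.Str.startswith t "-" = true
    · have hstep : pvGroupStep gs t = gs ++ [[t]] := by
        unfold pvGroupStep
        rw [hd, Bool.or_true, if_pos rfl]
      rw [hstep, ih (gs ++ [[t]]) (by simp), pvTakeRun_pos t rest hd,
          show (gs ++ [[t]]).dropLast = gs by simp,
          show (gs ++ [[t]]).getLastD [] = [t] by simp,
          pvGrp_cons, List.append_nil, List.append_cons gs.dropLast, pvLastSplit gs hgs]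
      rfl
    · have hdf : PySem.Str.startswith t "-" = false := by
        cases h' : PySem.Str.startswith t "-" <;> simp_all
      have hne : gs.isEmpty = false := by
        cases gs with
        | nil => exact absurd rfl hgs
        | cons a as => rfl
      have hstep : pvGroupStep gs t = gs.dropLast ++ [gs.getLastD [] ++ [t]] := by
        unfold pvGroupStep
        rw [hne, hdf]
        simp
      rw [hstep, ih (gs.dropLast ++ [gs.getLastD [] ++ [t]]) (by simp), pvTakeRun_neg t rest hd,
          show (gs.dropLast ++ [gs.getLastD [] ++ [t]]).dropLast = gs.dropLast by simp,
          show (gs.dropLast ++ [gs.getLastD [] ++ [t]]).getLastD [] = gs.getLastD [] ++ [t] by simp,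
          List.append_assoc]
      rfl

-- phase 2 of B, as a recursive selection over the runs
def pvSel (lparam : List String) : List (List String) → List String
  | [] => []
  | g :: gl => (if ¬ (lparam.contains (g.headD "")) then g else []) ++ pvSel lparam gl

theorem pvFoldSel (lparam : List String) :
    ∀ (gl : List (List String)) (acc : List String),
      gl.foldl (fun res g => if ¬ (lparam.contains (g.headD "")) then res ++ g else res) acc
        = acc ++ pvSel lparam gl := by
  intro gl
  induction gl with
  | nil => intro acc; simp [pvSel]
  | cons g gl ih =>
    intro acc
    rw [List.foldl_cons, pvSel]
    by_cases h : lparam.contains (g.headD "") = true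
    · rw [if_neg (not_not_intro h), if_neg (not_not_intro h), ih, List.nil_append]
    · rw [if_pos h, if_pos h, ih, List.append_assoc]

-- A's loop computes the selection over the canonical grouping
theorem pvALoop_eq_sel (lparam : List String) : ∀ (l : List String),
    pvALoop lparam l = pvSel lparam (pvGrp l) := by
  intro l
  induction l using pvALoop.induct lparam with
  | case1 => rw [pvALoop, pvGrp]; rfl
  | case2 t rest hmem ih =>
    rw [pvALoop, if_pos hmem, ih, pvSkipRun_eq_takeRun_snd, pvGrp_cons, pvSel,
        if_neg (by rw [List.headD_cons]; exact not_not_intro hmem), List.nil_append]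
  | case3 t rest hmem ih =>
    rw [pvALoop, if_neg hmem, ih, pvGrp_cons, pvSel,
        if_pos (by rw [List.headD_cons]; exact hmem)]

-- ===== VERDICT (by name: the statement is the Claim_ definition above) =====
theorem get_params_except_specified_py_spec : Claim_equal_get_params_except_specified_py := by
  intro lparam listcmd _
  unfold Spec_get_params_except_specified_py
  unfold get_params_except_specified_py get_params_except_specified_py_alt
  cases listcmd with
  | nil =>
    show pvALoop lparam [] = []
    rw [pvALoop]
  | cons t rest =>
    show pvALoop lparam (t :: rest) =
      List.foldl (fun res g => if ¬ (lparam.contains (g.headD "")) then res ++ g else res) []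
        (List.foldl pvGroupStep [] (t :: rest))
    rw [List.foldl_cons, show pvGroupStep [] t = [[t]] from rfl,
        pvFoldGroup rest [[t]] (by simp), pvFoldSel, List.nil_append,
        pvALoop_eq_sel, pvGrp_cons]
    rfl
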